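-- pv_equiv track=rewrite | github.com/z8Tygas/Laboratorios-de-Algoritmia-II | Torneio 1/hacker.py | hacker
-- ===== SOURCE A (Python) =====
-- def hacker(log):
--     mail = {}
--     for c,e in log:
--         if e not in mail.keys():
--             mail[e] = c
--         else:
--             cf = ""
--             for i in range(0,16):
--                 if c[i] != '*':
--                     cf += c[i]
--                 else:
--                     cf += mail[e][i]
--             mail[e] = cf
--
--     result = [(c,e) for e,c in sorted(mail.items(), key = lambda x: (x[1].count('*'), x[0]))]
--     return result
-- ===== SOURCE B (Python) =====
-- def hacker(log):
--     codes = {}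
--     for c, e in log:
--         codes.setdefault(e, []).append(c)
--     items = []
--     for e, cs in codes.items():
--         if len(cs) == 1:
--             merged = cs[0]
--         else:
--             merged = ''.join(
--                 next((c[i] for c in reversed(cs) if c[i] != '*'), '*')
--                 for i in range(16))
--         items.append((e, merged))
--     items.sort(key=lambda p: (p[1].count('*'), p[0]))
--     return [(c, e) for e, c in items]
-- ===== Notes on version B (the rewrite author's own statement) =====
-- stated objective: alternative
-- what changed: A merges each repeated code eagerly into a single dict entry while scanning the log (character-wise overwrite fold); B groups the codes per email and then computes each of the 16 output characters directly, by a per-position backwards search (next over reversed(cs)) for the last non-wildcard observation, with no intermediate merged strings at all. Pre_ excludes logs in which a repeated email carries a code shorter than 16 characters, on which A's fixed range(16) indexing can raise IndexError (B's per-position indexing likewise can).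
-- outside the precondition, e.g. on hacker([('ab', 'e'), ('****************', 'e')]): A raises IndexError, B raises IndexError
import Mathlib
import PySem

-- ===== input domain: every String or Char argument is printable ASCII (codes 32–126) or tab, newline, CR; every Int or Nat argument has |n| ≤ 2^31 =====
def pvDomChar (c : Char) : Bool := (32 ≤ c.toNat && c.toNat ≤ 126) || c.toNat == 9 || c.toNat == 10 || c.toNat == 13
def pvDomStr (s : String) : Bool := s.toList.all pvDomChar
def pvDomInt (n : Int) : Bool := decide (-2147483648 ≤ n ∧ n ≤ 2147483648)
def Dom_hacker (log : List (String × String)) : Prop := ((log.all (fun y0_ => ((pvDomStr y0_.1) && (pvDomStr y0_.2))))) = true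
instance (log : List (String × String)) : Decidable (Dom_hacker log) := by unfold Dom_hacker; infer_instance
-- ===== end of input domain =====

-- B groups the codes per email, then computes each of the 16 output characters directly by a
-- per-position backwards search for the last non-wildcard observation (no merged intermediate
-- strings); alternative algorithm, same cost; return value only.


-- ===== PORT A =====
-- A's inner merge: cf = ""; for i in range(0,16): cf += c[i] if c[i] != '*' else mail[e][i]
-- (indexing ported with pyGetD, exact under Pre_hacker, which puts both indexed codes at length ≥ 16)
def mergeStepA (c old : String) : String :=
  String.ofList ((PySem.List.pyRange 0 16 1).foldl (fun cf i =>
    if PySem.List.pyGetD c.toList i ' ' ≠ '*' then cf ++ [PySem.List.pyGetD c.toList i ' ']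
    else cf ++ [PySem.List.pyGetD old.toList i ' ']) [])

def mailStepA (mail : PySem.Dict String String) (p : String × String) : PySem.Dict String String :=
  if mail.contains p.2 = false then mail.insert p.2 p.1
  else mail.insert p.2 (mergeStepA p.1 (mail.getD p.2 ""))

def hacker (log : List (String × String)) : List (String × String) :=
  let mail := log.foldl mailStepA PySem.Dict.empty
  (PySem.List.sorted2 mail.items (fun x => PySem.Str.count x.2 "*") (fun x => x.1)).map
    (fun p => (p.2, p.1))

-- ===== PORT B =====
-- ''.join(next((c[i] for c in reversed(cs) if c[i] != '*'), '*') for i in range(16))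
-- (a join of characters is String.ofList; next(gen, default) is find? with a default)
def collapseB (cs : List String) : String :=
  String.ofList ((PySem.List.pyRange 0 16 1).map (fun i =>
    match cs.reverse.find? (fun c => PySem.List.pyGetD c.toList i ' ' != '*') with
    | some c => PySem.List.pyGetD c.toList i ' '
    | none => '*'))

-- codes.setdefault(e, []).append(c)
def groupStep (d : PySem.Dict String (List String)) (p : String × String) :
    PySem.Dict String (List String) :=
  d.modify p.2 [] (fun cs => cs ++ [p.1])

def hacker_alt (log : List (String × String)) : List (String × String) :=
  let codes := log.foldl groupStep PySem.Dict.empty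
  let items := codes.items.map (fun p =>
    (p.1, if p.2.length = 1 then PySem.List.pyGetD p.2 0 "" else collapseB p.2))
  (PySem.List.sorted2 items (fun x => PySem.Str.count x.2 "*") (fun x => x.1)).map
    (fun p => (p.2, p.1))

-- ===== PRECONDITION & SPEC =====
-- Pre_ excludes logs in which a repeated email carries a code shorter than 16 characters: there
-- A's fixed range(16) indexing can raise IndexError (and B's per-position indexing likewise can),
-- while both ports read a harmless default character instead.
def Pre_hacker (log : List (String × String)) : Prop :=
  ∀ p ∈ log, 2 ≤ log.countP (fun q => q.2 = p.2) → 16 ≤ p.1.toList.length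
instance (log : List (String × String)) : Decidable (Pre_hacker log) := by
  unfold Pre_hacker; infer_instance
def pvWitness_hacker : (List (String × String)) :=
  [("ab*cdefghijklmno", "x"), ("zz", "y"), ("abqcdefghijklmno", "x")]
def Spec_hacker (log : List (String × String)) (out : List (String × String)) : Prop := out = hacker_alt log
instance (log : List (String × String)) (out : List (String × String)) : Decidable (Spec_hacker log out) := by unfold Spec_hacker; infer_instance

-- ===== CLAIM (what is proved, stated in full; the proofs are below) =====
def Claim_equal_hacker : Prop := ∀ (log : List (String × String)), Dom_hacker log → Pre_hacker log → Spec_hacker log (hacker log)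

-- ===== LEMMAS AND PROOFS =====

-- A's whole per-email accumulation, as a function of the email's codes in log order
def mergeAllA (cs : List String) : String :=
  cs.tail.foldl (fun acc c => mergeStepA c acc) (cs.headD "")

-- B's per-position search, named for the proofs
def findStar (l : List String) (i : Int) : Char :=
  match l.find? (fun c => PySem.List.pyGetD c.toList i ' ' != '*') with
  | some c => PySem.List.pyGetD c.toList i ' '
  | none => '*'

theorem collapseB_eq (cs : List String) :
    collapseB cs = String.ofList ((PySem.List.pyRange 0 16 1).map
      (fun i => findStar cs.reverse i)) := rfl

theorem findStar_cons (c : String) (l : List String) (i : Int) :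
    findStar (c :: l) i =
      if PySem.List.pyGetD c.toList i ' ' ≠ '*' then PySem.List.pyGetD c.toList i ' '
      else findStar l i := by
  unfold findStar
  by_cases h : PySem.List.pyGetD c.toList i ' ' = '*' <;>
    simp [h]

theorem mergeAllA_singleton (c : String) : mergeAllA [c] = c := rfl

theorem mergeAllA_append (cs : List String) (h : cs ≠ []) (c : String) :
    mergeAllA (cs ++ [c]) = mergeStepA c (mergeAllA cs) := by
  obtain ⟨c0, t, rfl⟩ := List.exists_cons_of_ne_nil h
  simp [mergeAllA, List.foldl_append]

theorem mergeStepA_eq_ofList (c old : String) :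
    mergeStepA c old = String.ofList ((PySem.List.pyRange 0 16 1).map (fun i =>
      if PySem.List.pyGetD c.toList i ' ' ≠ '*' then PySem.List.pyGetD c.toList i ' '
      else PySem.List.pyGetD old.toList i ' ')) := by
  unfold mergeStepA
  have hstep : (fun (cf : List Char) (i : Int) =>
      if PySem.List.pyGetD c.toList i ' ' ≠ '*' then cf ++ [PySem.List.pyGetD c.toList i ' ']
      else cf ++ [PySem.List.pyGetD old.toList i ' ']) =
      (fun (cf : List Char) (i : Int) => cf ++
        [if PySem.List.pyGetD c.toList i ' ' ≠ '*' then PySem.List.pyGetD c.toList i ' '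
         else PySem.List.pyGetD old.toList i ' ']) := by
    funext cf i; split <;> rfl
  rw [hstep, PySem.List.foldl_append_singleton_eq_map, List.nil_append]

theorem mergeStepA_toList (c old : String) :
    (mergeStepA c old).toList = (PySem.List.pyRange 0 16 1).map (fun i =>
      if PySem.List.pyGetD c.toList i ' ' ≠ '*' then PySem.List.pyGetD c.toList i ' '
      else PySem.List.pyGetD old.toList i ' ') := by
  rw [mergeStepA_eq_ofList]
  simp

-- A's accumulated character at a position is B's backwards-search character
theorem fold_eq_find (t : List String) (c0 : String) (k : Nat) (hk : k < 16) :
    PySem.List.pyGetD (t.foldl (fun acc c => mergeStepA c acc) c0).toList (k : Int) ' '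
      = findStar ((c0 :: t).reverse) (k : Int) := by
  induction t using List.reverseRecOn with
  | nil =>
    rw [List.foldl_nil, List.reverse_singleton, findStar_cons]
    split_ifs with h
    · rfl
    · push Not at h
      rw [h]
      rfl
  | append_singleton t c ih =>
    rw [List.foldl_append, List.foldl_cons, List.foldl_nil]
    have hrev : (c0 :: (t ++ [c])).reverse = c :: (c0 :: t).reverse := by
      simp
    rw [hrev, findStar_cons, mergeStepA_toList,
      PySem.List.pyGetD_map_pyRange_of_nonneg _ 16 (k : Int) ' ' (by omega) (by omega)]
    split_ifs with h
    · rfl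
    · exact ih

-- bridge: A's per-email merged value equals B's per-email value
theorem mergeAllA_eq_B (cs : List String) (h : cs ≠ []) :
    mergeAllA cs =
      if cs.length = 1 then PySem.List.pyGetD cs 0 "" else collapseB cs := by
  match cs with
  | [c0] => simp [mergeAllA_singleton, PySem.List.pyGetD_zero_cons]
  | c0 :: c1 :: t =>
    have hlen : (c0 :: c1 :: t).length ≠ 1 := by simp
    obtain ⟨l, c, hl2⟩ : ∃ l c, c1 :: t = l ++ [c] := by
      refine ⟨(c1 :: t).dropLast, (c1 :: t).getLast (by simp), ?_⟩
      exact (List.dropLast_append_getLast (by simp)).symm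
    rw [if_neg hlen, collapseB_eq]
    rw [hl2]
    have hform : mergeAllA (c0 :: (l ++ [c])) =
        (l ++ [c]).foldl (fun acc c => mergeStepA c acc) c0 := rfl
    rw [hform, List.foldl_append, List.foldl_cons, List.foldl_nil, mergeStepA_eq_ofList]
    congr 1
    apply List.ext_getElem
    · simp
    · intro k h1 h2
      have hk : k < 16 := by
        simpa [PySem.List.length_pyRange_one] using h1
      have hL := PySem.List.getElem?_map_pyRange_zero
        (fun i => if PySem.List.pyGetD c.toList i ' ' ≠ '*' then PySem.List.pyGetD c.toList i ' '
          else PySem.List.pyGetD ((l.foldl (fun acc c => mergeStepA c acc) c0).toList) i ' ')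
        16 k hk
      have hR := PySem.List.getElem?_map_pyRange_zero
        (fun i => findStar (c0 :: (l ++ [c])).reverse i) 16 k hk
      simp only [Nat.cast_ofNat] at hL hR
      rw [List.getElem?_eq_getElem h1, Option.some.injEq] at hL
      rw [List.getElem?_eq_getElem h2, Option.some.injEq] at hR
      rw [hL, hR]
      have hfold := fold_eq_find l c0 k hk
      have hrev : (c0 :: (l ++ [c])).reverse = c :: (c0 :: l).reverse := by
        simp
      rw [hrev, findStar_cons]
      split_ifs with h'
      · rfl
      · exact hfold

-- A's dict of merged codes IS B's dict of grouped codes, collapsed entrywise by mergeAllA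
theorem hacker_inv (rest : List (String × String)) :
    ∀ (mail : PySem.Dict String String) (groups : PySem.Dict String (List String)),
    groups.keys.Nodup →
    mail.items = groups.items.map (fun p => (p.1, mergeAllA p.2)) →
    (∀ p ∈ groups.items, p.2 ≠ []) →
    (rest.foldl mailStepA mail).items =
      ((rest.foldl groupStep groups).items).map (fun p => (p.1, mergeAllA p.2)) ∧
    (∀ p ∈ (rest.foldl groupStep groups).items, p.2 ≠ []) := by
  induction rest with
  | nil => intro mail groups _ h1 hne; exact ⟨by simpa using h1, by simpa using hne⟩
  | cons q rest ih =>
    intro mail groups hnd h1 hne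
    obtain ⟨c, e⟩ := q
    have hcont : mail.contains e = groups.contains e := by
      simp [PySem.Dict.contains, h1, List.any_map, Function.comp_def]
    by_cases hc : groups.contains e = true
    · -- merge case: e already present
      obtain ⟨cs, hcs⟩ : ∃ cs, groups.get? e = some cs := by
        have h := PySem.Dict.contains_eq_isSome_get? groups e
        rw [hc] at h
        exact Option.isSome_iff_exists.mp h.symm
      have hmem : (e, cs) ∈ groups.items := PySem.Dict.mem_items_of_get?_eq_some groups hcs
      have hcsne : cs ≠ [] := hne _ hmem
      have hmailnd : mail.keys.Nodup := by
        have hk : mail.keys = groups.keys := by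
          simp [PySem.Dict.keys, h1]
        rw [hk]; exact hnd
      have hold : mail.getD e "" = mergeAllA cs := by
        have hm : (e, mergeAllA cs) ∈ mail.items := by
          rw [h1]; exact List.mem_map_of_mem hmem
        exact PySem.Dict.getD_of_mem_items _ hm hmailnd ""
      have hstepA : mailStepA mail (c, e) =
          mail.insert e (mergeStepA c (mail.getD e "")) := by
        simp [mailStepA, hcont, hc]
      have hstepB : groupStep groups (c, e) = groups.insert e (cs ++ [c]) := by
        simp [groupStep, PySem.Dict.modify, PySem.Dict.getD, hcs]
      rw [List.foldl_cons, List.foldl_cons, hstepA, hstepB]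
      refine ih _ _ (PySem.Dict.nodup_keys_insert groups e (cs ++ [c]) hnd) ?_ ?_
      · have hmc : mail.contains e = true := by rw [hcont]; exact hc
        rw [PySem.Dict.items_insert_of_contains _ _ hmc,
            PySem.Dict.items_insert_of_contains _ _ hc, h1,
            List.map_map, List.map_map]
        refine List.map_congr_left (fun p hp => ?_)
        by_cases hpe : p.1 = e
        · simp [hpe, hold, mergeAllA_append cs hcsne c]
        · simp [hpe]
      · intro p hp
        rcases (PySem.Dict.mem_items_insert _ _ _ _).mp hp with h | ⟨h, _⟩
        · subst h; simp
        · exact hne p h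
    · -- fresh email
      have hc' : groups.contains e = false := by simpa using hc
      have hmc : mail.contains e = false := by rw [hcont]; exact hc'
      have hstepA : mailStepA mail (c, e) = mail.insert e c := by
        simp [mailStepA, hmc]
      have hstepB : groupStep groups (c, e) = groups.insert e [c] := by
        simp [groupStep, PySem.Dict.modify, PySem.Dict.getD_of_not_contains groups [] hc']
      rw [List.foldl_cons, List.foldl_cons, hstepA, hstepB]
      refine ih _ _ (PySem.Dict.nodup_keys_insert groups e [c] hnd) ?_ ?_
      · rw [PySem.Dict.items_insert_of_not_contains _ _ hmc,
            PySem.Dict.items_insert_of_not_contains _ _ hc', h1]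
        simp [mergeAllA_singleton]
      · intro p hp
        rcases (PySem.Dict.mem_items_insert _ _ _ _).mp hp with h | ⟨h, _⟩
        · subst h; simp
        · exact hne p h

-- ===== VERDICT (by name: the statement is the Claim_ definition above) =====
theorem hacker_spec : Claim_equal_hacker := by
  intro log _ _
  unfold Spec_hacker hacker hacker_alt
  dsimp only
  obtain ⟨hitems, hne⟩ := hacker_inv log PySem.Dict.empty PySem.Dict.empty
    (by simp) (by simp [PySem.Dict.empty]) (by simp [PySem.Dict.empty])
  rw [hitems]
  have hmap : ((log.foldl groupStep PySem.Dict.empty).items).map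
      (fun p => (p.1, mergeAllA p.2)) =
      ((log.foldl groupStep PySem.Dict.empty).items).map (fun p =>
        (p.1, if p.2.length = 1 then PySem.List.pyGetD p.2 0 "" else collapseB p.2)) := by
    refine List.map_congr_left (fun p hp => ?_)
    rw [mergeAllA_eq_B p.2 (hne p hp)]
  rw [hmap]
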